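-- pv_equiv track=rewrite | github.com/Kuan-Ting-Cho/Macronix_2024 | Humanoid Robot Control/src/Speed_ctrl/function.py | Sole_Status
-- ===== SOURCE A (Python) =====
-- def Sole_Status(fsr):
--     sensordata = sum(fsr, []) #拉平
--     #確認腳底板是否觸地(觸地即picth方向需平行)
--     parallel=[]
--     phase=0
--     for idx in range(0,len(sensordata),2):
--         if sensordata[idx]!=0 or sensordata[idx+1]!=0:
--            parallel.append(1)
--         else:
--            parallel.append(0)
--     #確認腳是否懸空
--     if  parallel[0]+parallel[1]== 0:
--         phase = 2   #左腳懸空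
--     elif parallel[2]+parallel[3]== 0:
--         phase = 1   #右腳懸空
--     elif parallel[0]+parallel[1]+parallel[2]+parallel[3]==4:
--         phase = 0   #DSP
--     elif parallel[0]+parallel[1]+parallel[3]==3:
--         phase = 3   #Switch l2r
--     elif parallel[1]+parallel[2]+parallel[3]==3:
--         phase = 4   #Switch r2l
--     else:
--         phase = 0   #DSP
--
--     return phase
-- ===== SOURCE B (Python) =====
-- # Table-driven rewrite: same pair flags, but the ordered if/elif phase rules are
-- # precomputed into a 16-entry lookup indexed by the 4-bit flag pattern.
-- _SOLE_TABLE = [2, 2, 2, 2, 1, 0, 0, 4, 1, 0, 0, 0, 1, 3, 0, 0]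
--
-- def Sole_Status(fsr):
--     data = [v for row in fsr for v in row]
--     flags = [1 if (data[i] != 0 or data[i + 1] != 0) else 0
--              for i in range(0, len(data), 2)]
--     if flags[0] + flags[1] == 0:
--         return 2
--     if flags[2] + flags[3] == 0:
--         return 1
--     return _SOLE_TABLE[flags[0] * 8 + flags[1] * 4 + flags[2] * 2 + flags[3]]
-- ===== Notes on version B (the rewrite author's own statement) =====
-- stated objective: simpler
-- what changed: The five-branch if/elif decision tree over the four pair flags is replaced by a precomputed 16-entry lookup table indexed by the 4-bit flag pattern (keeping the two early-exit guards A checks before touching flags 2 and 3), and the quadratic repeated-concatenation flatten via sum becomes a linear list comprehension.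
import Mathlib
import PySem

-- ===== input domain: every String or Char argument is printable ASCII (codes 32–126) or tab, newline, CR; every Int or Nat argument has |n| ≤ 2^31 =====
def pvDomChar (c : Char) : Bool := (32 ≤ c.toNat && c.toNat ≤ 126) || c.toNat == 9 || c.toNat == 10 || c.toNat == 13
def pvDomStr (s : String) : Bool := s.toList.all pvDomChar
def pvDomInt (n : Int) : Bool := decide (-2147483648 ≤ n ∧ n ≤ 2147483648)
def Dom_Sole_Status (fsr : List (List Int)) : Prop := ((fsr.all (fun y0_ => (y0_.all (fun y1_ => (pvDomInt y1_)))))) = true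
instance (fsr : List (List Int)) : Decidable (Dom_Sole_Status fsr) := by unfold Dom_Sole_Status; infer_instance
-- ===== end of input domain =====

-- B replaces A's if/elif decision tree over the four pair flags by a constant 16-entry
-- lookup table indexed by the 4-bit flag pattern (objective: simpler).

-- ===== PORT A =====
def Sole_Status (fsr : List (List Int)) : Int :=
  let sensordata := fsr.flatten
  let parallel :=
    (PySem.List.pyRange 0 (sensordata.length : Int) 2).foldl
      (fun acc idx =>
        if PySem.List.pyGetD sensordata idx 0 ≠ 0 ∨ PySem.List.pyGetD sensordata (idx + 1) 0 ≠ 0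
        then acc ++ [(1 : Int)] else acc ++ [(0 : Int)]) []
  if PySem.List.pyGetD parallel 0 0 + PySem.List.pyGetD parallel 1 0 = 0 then 2
  else if PySem.List.pyGetD parallel 2 0 + PySem.List.pyGetD parallel 3 0 = 0 then 1
  else if PySem.List.pyGetD parallel 0 0 + PySem.List.pyGetD parallel 1 0 +
          PySem.List.pyGetD parallel 2 0 + PySem.List.pyGetD parallel 3 0 = 4 then 0
  else if PySem.List.pyGetD parallel 0 0 + PySem.List.pyGetD parallel 1 0 +
          PySem.List.pyGetD parallel 3 0 = 3 then 3
  else if PySem.List.pyGetD parallel 1 0 + PySem.List.pyGetD parallel 2 0 +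
          PySem.List.pyGetD parallel 3 0 = 3 then 4
  else 0

-- ===== PORT B =====
def soleTable : List Int := [2, 2, 2, 2, 1, 0, 0, 4, 1, 0, 0, 0, 1, 3, 0, 0]

def Sole_Status_alt (fsr : List (List Int)) : Int :=
  let data := fsr.flatten
  let flags :=
    (PySem.List.pyRange 0 (data.length : Int) 2).map
      (fun i =>
        if PySem.List.pyGetD data i 0 ≠ 0 ∨ PySem.List.pyGetD data (i + 1) 0 ≠ 0
        then (1 : Int) else 0)
  if PySem.List.pyGetD flags 0 0 + PySem.List.pyGetD flags 1 0 = 0 then 2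
  else if PySem.List.pyGetD flags 2 0 + PySem.List.pyGetD flags 3 0 = 0 then 1
  else PySem.List.pyGetD soleTable
         (PySem.List.pyGetD flags 0 0 * 8 + PySem.List.pyGetD flags 1 0 * 4 +
          PySem.List.pyGetD flags 2 0 * 2 + PySem.List.pyGetD flags 3 0) 0

-- ===== PRECONDITION & SPEC =====
-- Pre_ excludes exactly the inputs where the Python raises IndexError: an odd number of
-- sensor values whose last value is 0 (the pair loop reads past the end), or too few
-- pairs for the flag indexing that the branch actually reached performs.
def Pre_Sole_Status (fsr : List (List Int)) : Prop :=
  let s := fsr.flatten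
  (s.length % 2 = 0 ∨ PySem.List.pyGetD s ((s.length : Int) - 1) 0 ≠ 0) ∧
  2 ≤ (s.length + 1) / 2 ∧
  (4 ≤ (s.length + 1) / 2 ∨ s.take 4 = [0, 0, 0, 0])
instance (fsr : List (List Int)) : Decidable (Pre_Sole_Status fsr) := by
  unfold Pre_Sole_Status; infer_instance

def pvWitness_Sole_Status : List (List Int) := [[1, 0, 0, 2], [0, 0, 3, 1]]

def Spec_Sole_Status (fsr : List (List Int)) (out : Int) : Prop := out = Sole_Status_alt fsr
instance (fsr : List (List Int)) (out : Int) : Decidable (Spec_Sole_Status fsr out) := by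
  unfold Spec_Sole_Status; infer_instance

-- ===== CLAIM (what is proved, stated in full; the proofs are below) =====
def Claim_equal_Sole_Status : Prop := ∀ (fsr : List (List Int)), Dom_Sole_Status fsr → Pre_Sole_Status fsr → Spec_Sole_Status fsr (Sole_Status fsr)

-- ===== LEMMAS AND PROOFS =====

-- A's append-accumulating flag loop builds exactly the mapped flag list of B.
theorem foldl_if_append (P : Int → Prop) [DecidablePred P] :
    ∀ (l : List Int) (acc : List Int),
      l.foldl (fun a i => if P i then a ++ [(1 : Int)] else a ++ [(0 : Int)]) acc =
        acc ++ l.map (fun i => if P i then (1 : Int) else 0) := by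
  intro l
  induction l with
  | nil => intro acc; simp
  | cons x xs ih =>
      intro acc
      by_cases hx : P x <;> simp [hx, ih]

theorem getD01_of_mem01 (l : List Int) (h : ∀ x ∈ l, x = 0 ∨ x = 1) (i : Int) :
    PySem.List.pyGetD l i 0 = 0 ∨ PySem.List.pyGetD l i 0 = 1 := by
  cases hg : PySem.List.pyGet? l i with
  | none => left; simp [PySem.List.pyGetD, hg]
  | some v =>
      have hv := h v (PySem.List.mem_of_pyGet?_eq_some _ hg)
      simpa [PySem.List.pyGetD, hg] using hv

-- The table agrees with the ordered if/elif rules on every 0/1 flag quadruple.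
theorem chain_eq_table (a b c d : Int)
    (ha : a = 0 ∨ a = 1) (hb : b = 0 ∨ b = 1) (hc : c = 0 ∨ c = 1) (hd : d = 0 ∨ d = 1) :
    (if a + b = 0 then (2 : Int)
     else if c + d = 0 then 1
     else if a + b + c + d = 4 then 0
     else if a + b + d = 3 then 3
     else if b + c + d = 3 then 4
     else 0) =
    (if a + b = 0 then (2 : Int)
     else if c + d = 0 then 1
     else PySem.List.pyGetD soleTable (a * 8 + b * 4 + c * 2 + d) 0) := by
  rcases ha with rfl | rfl <;> rcases hb with rfl | rfl <;>
    rcases hc with rfl | rfl <;> rcases hd with rfl | rfl <;> decide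

-- ===== VERDICT (by name: the statement is the Claim_ definition above) =====
theorem Sole_Status_spec : Claim_equal_Sole_Status := by
  intro fsr _ _
  unfold Spec_Sole_Status Sole_Status Sole_Status_alt
  dsimp only
  rw [foldl_if_append]
  simp only [List.nil_append]
  set F := (PySem.List.pyRange 0 (fsr.flatten.length : Int) 2).map
      (fun i =>
        if PySem.List.pyGetD fsr.flatten i 0 ≠ 0 ∨ PySem.List.pyGetD fsr.flatten (i + 1) 0 ≠ 0
        then (1 : Int) else 0) with hF
  have h01 : ∀ x ∈ F, x = 0 ∨ x = 1 := by
    intro x hx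
    rw [hF] at hx
    rcases List.mem_map.mp hx with ⟨i, -, rfl⟩
    split <;> simp
  exact chain_eq_table _ _ _ _ (getD01_of_mem01 F h01 0) (getD01_of_mem01 F h01 1)
    (getD01_of_mem01 F h01 2) (getD01_of_mem01 F h01 3)
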